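-- pv_equiv track=rewrite | github.com/aorursy/lost-nb | chekoduadarsh_epidemic-model-covid-19-india-visualizations.py | makeitstring
-- ===== SOURCE A (Python) =====
-- def makeitstring(line):
--     newLine = []
--     for x in line:
--         count = True
--         y = ''
--         for l in str(x):
--             if l == '.' and count == True:
--                 count = False
--                 y = y+l
--             elif l == '.' and count == False:
--                 continue
--             else:
--                 y = y+l
--
--         newLine.append(str(y))
--
--     return newLine
-- ===== SOURCE B (Python) =====
-- def _dedot(s):
--     parts = s.split('.')
--     if len(parts) <= 1:
--         return parts[0]
--     return parts[0] + '.' + ''.join(parts[1:])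
--
--
-- def makeitstring(line):
--     return [str(_dedot(str(x))) for x in line]
-- ===== Notes on version B (the rewrite author's own statement) =====
-- stated objective: idiomatic
-- what changed: Replaces the character-by-character loop with a seen-a-dot flag by a single str.split('.') followed by rebuilding parts[0] + '.' + ''.join(rest), dropping the inner loop and the boolean state.
import Mathlib
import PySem

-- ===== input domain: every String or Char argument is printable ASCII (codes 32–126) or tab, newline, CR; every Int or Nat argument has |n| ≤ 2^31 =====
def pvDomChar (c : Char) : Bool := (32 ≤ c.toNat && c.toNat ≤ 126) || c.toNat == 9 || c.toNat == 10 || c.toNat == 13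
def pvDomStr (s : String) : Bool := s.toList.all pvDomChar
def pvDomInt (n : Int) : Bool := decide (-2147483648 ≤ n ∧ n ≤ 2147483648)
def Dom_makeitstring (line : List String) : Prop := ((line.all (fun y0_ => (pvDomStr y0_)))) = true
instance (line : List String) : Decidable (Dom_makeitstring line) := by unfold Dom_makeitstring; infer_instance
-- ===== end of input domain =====

-- B replaces A's char-by-char loop with a dot-seen flag by split('.') + rebuild (idiomatic); same cost.

-- ===== PORT A =====
-- A's inner loop over the characters of str(x), state (count, y)
def aGo (count : Bool) (y : List Char) : List Char → List Char
  | [] => y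
  | c :: rest =>
      if c = '.' ∧ count = true then aGo false (y ++ [c]) rest
      else if c = '.' ∧ count = false then aGo count y rest
      else aGo count (y ++ [c]) rest

def makeitstring (line : List String) : List String :=
  line.foldl (fun newLine x => newLine ++ [String.ofList (aGo true [] x.toList)]) []

-- ===== PORT B =====
-- Source B's _dedot, at code-point level (PySem.Str wrappers are exactly toList/ofList around Chars)
def dedotChars (cs : List Char) : List Char :=
  match PySem.Chars.split? cs ['.'] with
  | none => []                          -- unreachable: the separator "." is nonempty
  | some parts =>
      match parts with
      | [] => []                        -- unreachable: split never returns an empty list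
      | p :: ps => if ps = [] then p else p ++ '.' :: PySem.Chars.join [] ps

def makeitstring_alt (line : List String) : List String :=
  line.map (fun x => String.ofList (dedotChars x.toList))

-- ===== PRECONDITION & SPEC =====
def Spec_makeitstring (line : List String) (out : List String) : Prop := out = makeitstring_alt line
instance (line : List String) (out : List String) : Decidable (Spec_makeitstring line out) := by unfold Spec_makeitstring; infer_instance

-- ===== CLAIM (what is proved, stated in full; the proofs are below) =====
def Claim_equal_makeitstring : Prop := ∀ (line : List String), Dom_makeitstring line → Spec_makeitstring line (makeitstring line)

-- ===== LEMMAS AND PROOFS =====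

-- clean recursive form of splitOn with '.' separator; pre is the current piece so far
def mySplit (pre : List Char) : List Char → List (List Char)
  | [] => [pre]
  | c :: rest => if c = '.' then pre :: mySplit [] rest else mySplit (pre ++ [c]) rest

theorem mySplit_ne_nil (pre l : List Char) : mySplit pre l ≠ [] := by
  induction l generalizing pre with
  | nil => simp [mySplit]
  | cons c rest ih => by_cases h : c = '.' <;> simp [mySplit, h, ih]

theorem splitOn_go_eq (l : List Char) : ∀ (fuel : Nat) (cur : List Char) (acc : List (List Char)),
    l.length ≤ fuel →
    PySem.Chars.splitOn.go ['.'] fuel l cur acc = acc.reverse ++ mySplit cur.reverse l := by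
  induction l with
  | nil =>
      intro fuel cur acc _
      cases fuel <;> simp [PySem.Chars.splitOn.go, mySplit]
  | cons c rest ih =>
      intro fuel cur acc hf
      cases fuel with
      | zero => simp at hf
      | succ n =>
        have hn : rest.length ≤ n := Nat.lt_succ_iff.mp (by simpa using hf)
        by_cases h : c = '.'
        · subst h
          simp [PySem.Chars.splitOn.go, List.isPrefixOf,
            ih n [] (cur.reverse :: acc) hn, mySplit]
        · simp [PySem.Chars.splitOn.go, List.isPrefixOf, h,
            ih n (c :: cur) acc hn, mySplit]
          intro heq; exact absurd heq.symm h

theorem splitOn_eq_mySplit (cs : List Char) :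
    PySem.Chars.splitOn cs ['.'] = mySplit [] cs := by
  simpa using splitOn_go_eq cs (cs.length + 1) [] [] (Nat.le_succ _)

theorem join_nil_eq_flatten (parts : List (List Char)) :
    PySem.Chars.join [] parts = parts.flatten := by
  simp [PySem.Chars.join, List.intercalate]
  induction parts with
  | nil => simp
  | cons p ps ih => cases ps <;> simp_all [List.intersperse]

theorem flatten_mySplit (l : List Char) : ∀ (pre : List Char),
    (mySplit pre l).flatten = pre ++ l.filter (· ≠ '.') := by
  induction l with
  | nil => intro pre; simp [mySplit]
  | cons c rest ih =>
      intro pre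
      by_cases h : c = '.' <;> simp [mySplit, h, ih]

theorem aGo_false (l : List Char) : ∀ (y : List Char),
    aGo false y l = y ++ l.filter (· ≠ '.') := by
  induction l with
  | nil => intro y; simp [aGo]
  | cons c rest ih =>
      intro y
      by_cases h : c = '.' <;> simp [aGo, h, ih]

theorem rebuild_eq_aGo (l : List Char) : ∀ (pre : List Char),
    (match mySplit pre l with
     | [] => []
     | p :: ps => if ps = [] then p else p ++ '.' :: PySem.Chars.join [] ps)
    = aGo true pre l := by
  induction l with
  | nil => intro pre; simp [mySplit, aGo]
  | cons c rest ih =>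
      intro pre
      by_cases h : c = '.'
      · subst h
        have hne := mySplit_ne_nil [] rest
        have hf := flatten_mySplit rest []
        rw [show mySplit pre ('.' :: rest) = pre :: mySplit [] rest from by simp [mySplit],
            show aGo true pre ('.' :: rest) = aGo false (pre ++ ['.']) rest from by simp [aGo],
            aGo_false]
        cases hms : mySplit [] rest with
        | nil => exact absurd hms hne
        | cons p ps =>
            rw [hms] at hf
            simp only [List.flatten_cons, List.nil_append] at hf
            show (if (p :: ps : List (List Char)) = [] then pre
                  else pre ++ '.' :: PySem.Chars.join [] (p :: ps)) = _
            rw [if_neg (by simp), join_nil_eq_flatten]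
            simpa using hf
      · rw [show mySplit pre (c :: rest) = mySplit (pre ++ [c]) rest from by simp [mySplit, h],
            show aGo true pre (c :: rest) = aGo true (pre ++ [c]) rest from by simp [aGo, h]]
        exact ih (pre ++ [c])

theorem dedotChars_eq_aGo (cs : List Char) : dedotChars cs = aGo true [] cs := by
  unfold dedotChars
  rw [show PySem.Chars.split? cs ['.'] = some (mySplit [] cs) from by
        simp [PySem.Chars.split?, splitOn_eq_mySplit]]
  simpa using rebuild_eq_aGo cs []

theorem foldl_append_map (line : List String) : ∀ (acc : List String),
    line.foldl (fun newLine x => newLine ++ [String.ofList (aGo true [] x.toList)]) acc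
    = acc ++ line.map (fun x => String.ofList (aGo true [] x.toList)) := by
  induction line with
  | nil => intro acc; simp
  | cons x xs ih => intro acc; simp [List.foldl_cons, ih]

-- ===== VERDICT (by name: the statement is the Claim_ definition above) =====
theorem makeitstring_spec : Claim_equal_makeitstring := by
  intro line _
  unfold Spec_makeitstring makeitstring makeitstring_alt
  rw [foldl_append_map]
  simp [dedotChars_eq_aGo]
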